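-- pv_equiv track=rewrite | github.com/Pragya28/Competitive-Programming | 09-shortenlongruns-Python/shortenlongruns.py | shortenlongruns
-- ===== SOURCE A (Python) =====
-- def count(L, index):
-- 	c = 1
-- 	for i in range(index, len(L)-1):
-- 		if L[i] == L[i+1]:
-- 			c += 1
-- 		else:
-- 			break
-- 	return c
--
-- def shortenlongruns(L, k):
-- 	i = 0
-- 	res = []
-- 	while i < len(L):
-- 		n = count(L, i)
-- 		r = []
-- 		if n < k:
-- 			r = [L[i]] * n
-- 		else:
-- 			r = [L[i]] * (k-1)
-- 		res.extend(r)
-- 		i += n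
-- 	return res
-- ===== SOURCE B (Python) =====
-- def shortenlongruns(L, k):
--     res = []
--     prev = None
--     cnt = 0
--     for x in L:
--         if cnt and x == prev:
--             cnt += 1
--         else:
--             if cnt:
--                 res += [prev] * (cnt if cnt < k else k - 1)
--             prev, cnt = x, 1
--     if cnt:
--         res += [prev] * (cnt if cnt < k else k - 1)
--     return res
-- ===== Notes on version B (the rewrite author's own statement) =====
-- stated objective: simpler
-- what changed: Replaced the index-based while-loop with a count() helper that rescans each run by a single forward pass maintaining the current run's value and count, flushing each finished run once.
import Mathlib
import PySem

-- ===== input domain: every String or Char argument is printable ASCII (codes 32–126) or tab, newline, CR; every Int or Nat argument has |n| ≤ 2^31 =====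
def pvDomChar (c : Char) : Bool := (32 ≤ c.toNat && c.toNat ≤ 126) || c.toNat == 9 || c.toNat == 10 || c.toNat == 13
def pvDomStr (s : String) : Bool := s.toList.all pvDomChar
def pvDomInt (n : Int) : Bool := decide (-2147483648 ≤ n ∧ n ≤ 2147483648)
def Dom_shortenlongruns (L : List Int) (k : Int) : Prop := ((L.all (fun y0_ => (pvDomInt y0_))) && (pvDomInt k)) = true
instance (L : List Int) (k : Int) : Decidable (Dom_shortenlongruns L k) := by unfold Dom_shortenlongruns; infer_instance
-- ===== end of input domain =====

-- B replaces A's rescanning count() helper + index-based while-loop by a single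
-- forward pass that maintains the current run's value and count (objective: simpler).

-- ===== PORT A =====
-- count(L, index): for i in range(index, len(L)-1): compare L[i] with L[i+1], break on mismatch
def pvCountGo (L : List Int) : List Int → Int → Int
  | [], c => c
  | i :: rest, c =>
    if PySem.List.pyGetD L i 0 = PySem.List.pyGetD L (i+1) 0 then pvCountGo L rest (c+1)
    else c

def pvCount (L : List Int) (index : Int) : Int :=
  pvCountGo L (PySem.List.pyRange index ((L.length : Int) - 1) 1) 1

-- while i < len(L): i increases by n = count(L,i) ≥ 1 each iteration, so fuel = len(L) suffices
def pvMainGo (L : List Int) (k : Int) : Nat → Int → List Int → List Int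
  | 0, _, res => res
  | fuel+1, i, res =>
    if i < (L.length : Int) then
      let n := pvCount L i
      let r := if n < k then PySem.List.pyRepeat [PySem.List.pyGetD L i 0] n
               else PySem.List.pyRepeat [PySem.List.pyGetD L i 0] (k-1)
      pvMainGo L k fuel (i + n) (res ++ r)
    else res

def shortenlongruns (L : List Int) (k : Int) : List Int := pvMainGo L k L.length 0 []

-- ===== PORT B =====
-- res += [prev] * (cnt if cnt < k else k - 1)
def pvFlush (k prev cnt : Int) : List Int :=
  PySem.List.pyRepeat [prev] (if cnt < k then cnt else k - 1)

def pvAltGo (k : Int) : List Int → Int → Int → List Int → List Int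
  | [], prev, cnt, res => if cnt ≠ 0 then res ++ pvFlush k prev cnt else res
  | x :: xs, prev, cnt, res =>
    if cnt ≠ 0 ∧ x = prev then pvAltGo k xs prev (cnt + 1) res
    else pvAltGo k xs x 1 (if cnt ≠ 0 then res ++ pvFlush k prev cnt else res)

def shortenlongruns_alt (L : List Int) (k : Int) : List Int := pvAltGo k L 0 0 []

-- ===== PRECONDITION & SPEC =====
def Spec_shortenlongruns (L : List Int) (k : Int) (out : List Int) : Prop := out = shortenlongruns_alt L k
instance (L : List Int) (k : Int) (out : List Int) : Decidable (Spec_shortenlongruns L k out) := by unfold Spec_shortenlongruns; infer_instance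

-- ===== CLAIM (what is proved, stated in full; the proofs are below) =====
def Claim_equal_shortenlongruns : Prop := ∀ (L : List Int) (k : Int), Dom_shortenlongruns L k → Spec_shortenlongruns L k (shortenlongruns L k)

-- ===== LEMMAS AND PROOFS =====

-- canonical run-by-run form both ports are proved equal to
def pvSpec (k : Int) : List Int → List Int
  | [] => []
  | x :: xs =>
    pvFlush k x (1 + ((xs.takeWhile (· == x)).length : Int)) ++ pvSpec k (xs.dropWhile (· == x))
termination_by l => l.length
decreasing_by
  simpa using Nat.lt_succ_of_le (List.length_dropWhile_le _ _)

theorem pv_dropWhile_eq_drop {α : Type} (p : α → Bool) (l : List α) :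
    l.dropWhile p = l.drop (l.takeWhile p).length := by
  induction l with
  | nil => rfl
  | cons a t ih =>
    by_cases hp : p a
    · simp [hp, ih]
    · simp [hp]

theorem pvSpec_cons (k x : Int) (xs : List Int) :
    pvSpec k (x :: xs) = pvFlush k x (1 + ((xs.takeWhile (· == x)).length : Int))
      ++ pvSpec k (xs.dropWhile (· == x)) := by
  rw [pvSpec]

theorem pvCount_eq (L : List Int) (i : Nat) (c : Int) (h : i < L.length) :
    pvCountGo L (PySem.List.pyRange (i : Int) ((L.length : Int) - 1) 1) c
      = c + (((L.drop (i+1)).takeWhile (· == L[i])).length : Int) := by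
  by_cases h2 : i + 1 < L.length
  · rw [PySem.List.pyRange_one_cons (by omega)]
    have hd : L.drop (i+1) = L[i+1] :: L.drop (i+2) := by
      simpa using List.drop_eq_getElem_cons h2
    have hi1 : (i : Int) + 1 = ((i+1 : Nat) : Int) := by push_cast; ring
    rw [pvCountGo, hi1, PySem.List.pyGetD_natCast, PySem.List.pyGetD_natCast,
        List.getD_eq_getElem L 0 h, List.getD_eq_getElem L 0 h2]
    by_cases he : L[i] = L[i+1]
    · have hpred : (fun y => y == L[i+1]) = (fun y => y == L[i]) := by
        funext y; rw [he]
      rw [if_pos he, pvCount_eq L (i+1) (c+1) h2, hpred, hd,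
          List.takeWhile_cons_of_pos (by simp [he.symm])]
      simp only [show i + 1 + 1 = i + 2 from rfl, List.length_cons]
      push_cast
      ring
    · rw [if_neg he, hd,
          List.takeWhile_cons_of_neg (by simp; exact fun hh => he hh.symm)]
      simp
  · rw [PySem.List.pyRange_one_eq_nil (by omega), pvCountGo,
        List.drop_eq_nil_of_le (by omega)]
    simp
termination_by L.length - i

theorem pvMainGo_eq (L : List Int) (k : Int) (fuel : Nat) :
    ∀ (i : Nat) (res : List Int), (L.drop i).length ≤ fuel →
      pvMainGo L k fuel (i : Int) res = res ++ pvSpec k (L.drop i) := by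
  induction fuel with
  | zero =>
    intro i res hf
    have : L.drop i = [] := List.eq_nil_of_length_eq_zero (Nat.le_zero.mp hf)
    rw [pvMainGo, this, pvSpec]
    simp
  | succ fuel ih =>
    intro i res hf
    by_cases hi : i < L.length
    · have hd : L.drop i = L[i] :: L.drop (i+1) := by
        simpa using List.drop_eq_getElem_cons hi
      rw [pvMainGo, if_pos (by exact_mod_cast hi)]
      have hcnt : pvCount L (i : Int) = 1 + (((L.drop (i+1)).takeWhile (· == L[i])).length : Int) := by
        rw [pvCount, pvCount_eq L i 1 hi]
      set tw := ((L.drop (i+1)).takeWhile (· == L[i])).length with htw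
      have hx : PySem.List.pyGetD L (i : Int) 0 = L[i] := by
        rw [PySem.List.pyGetD_natCast, List.getD_eq_getElem L 0 hi]
      have hr : (if pvCount L (i : Int) < k
            then PySem.List.pyRepeat [PySem.List.pyGetD L (i : Int) 0] (pvCount L (i : Int))
            else PySem.List.pyRepeat [PySem.List.pyGetD L (i : Int) 0] (k-1))
          = pvFlush k L[i] (1 + (tw : Int)) := by
        rw [hx, pvFlush, hcnt]
        split_ifs <;> rfl
      simp only [hr]
      have hstep : (i : Int) + pvCount L (i : Int) = ((i + 1 + tw : Nat) : Int) := by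
        rw [hcnt]; push_cast; ring
      rw [hstep, ih (i + 1 + tw) _ (by simp at hf ⊢; omega)]
      have hdw : (L.drop (i+1)).dropWhile (· == L[i]) = L.drop (i + 1 + tw) := by
        rw [pv_dropWhile_eq_drop, ← htw, List.drop_drop]
      rw [hd, pvSpec_cons, hdw, ← htw, List.append_assoc]
    · rw [pvMainGo, if_neg (by exact_mod_cast hi),
          List.drop_eq_nil_of_le (by omega), pvSpec]
      simp

theorem pvAltGo_eq (k : Int) (xs : List Int) :
    ∀ (prev cnt : Int) (res : List Int), 1 ≤ cnt →
      pvAltGo k xs prev cnt res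
        = res ++ pvFlush k prev (cnt + ((xs.takeWhile (· == prev)).length : Int))
              ++ pvSpec k (xs.dropWhile (· == prev)) := by
  induction xs with
  | nil =>
    intro prev cnt res hc
    rw [pvAltGo, if_pos (by omega)]
    simp [pvSpec]
  | cons x t ih =>
    intro prev cnt res hc
    by_cases hx : x = prev
    · rw [pvAltGo, if_pos ⟨by omega, hx⟩, ih prev (cnt+1) res (by omega),
          List.takeWhile_cons_of_pos (by simp [hx]),
          List.dropWhile_cons_of_pos (by simp [hx])]
      have : cnt + 1 + ((t.takeWhile (· == prev)).length : Int)
           = cnt + (((t.takeWhile (· == prev)).length : Nat) + 1 : Nat) := by push_cast; ring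
      rw [this]
      simp
    · rw [pvAltGo, if_neg (by tauto), if_pos (by omega), ih x 1 _ (by omega),
          List.takeWhile_cons_of_neg (by simp [hx]),
          List.dropWhile_cons_of_neg (by simp [hx])]
      rw [pvSpec_cons]
      simp [List.append_assoc]

theorem pv_ports_agree (L : List Int) (k : Int) : shortenlongruns L k = shortenlongruns_alt L k := by
  have hA : shortenlongruns L k = pvSpec k L := by
    rw [shortenlongruns]
    have h0 := pvMainGo_eq L k L.length 0 [] (by simp)
    simp only [Nat.cast_zero, List.drop_zero, List.nil_append] at h0
    exact h0
  rw [hA, shortenlongruns_alt]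
  cases L with
  | nil => rw [pvAltGo, if_neg (by omega), pvSpec]
  | cons x t =>
    rw [pvAltGo, if_neg (by simp), if_neg (by omega),
        pvAltGo_eq k t x 1 [] (by omega), pvSpec_cons]
    simp

-- ===== VERDICT (by name: the statement is the Claim_ definition above) =====
theorem shortenlongruns_spec : Claim_equal_shortenlongruns := by
  intro L k _
  exact pv_ports_agree L k
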